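-- pv_equiv track=rewrite | github.com/Darqhan/PythonGCSE_Hun | 32_zar.py | nyit
-- ===== SOURCE A (Python) =====
-- def nyit(jo,proba):
--     egyezik = (len(jo)==len(proba))
--     if(egyezik):
--         #ciklus és elteres értékadása fel vannak cserélve a feladatban
--         for i in range(2,len(jo)):
--             elteres=int(jo[i])-int(proba[i])
--             #hehe, itt rossz a feladat: önmagából kivonva moduló az mindig 0%10 lesz
--             if (elteres%10!=0):
--                 egyezik = False
--         return egyezik
-- ===== SOURCE B (Python) =====
-- def nyit(jo, proba):
--     # Wherever A returns without raising, every compared character (index >= 2)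
--     # is a decimal digit, and for digits the difference is divisible by 10 iff
--     # the digits are equal; so no arithmetic is needed at all: compare the tails
--     # as strings.  Length mismatch still falls through to an implicit None.
--     if len(jo) == len(proba):
--         return jo[2:] == proba[2:]
-- ===== Notes on version B (the rewrite author's own statement) =====
-- stated objective: simpler
-- what changed: B removes all integer parsing and modular arithmetic: since every compared character must be a decimal digit for A to return (otherwise int() raises), a per-position difference divisible by 10 is the same as equal digit characters, so B returns the single bulk string equality jo[2:] == proba[2:] instead of looping over indices, subtracting parsed digits and toggling a flag on the mod-10 test.
import Mathlib
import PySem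

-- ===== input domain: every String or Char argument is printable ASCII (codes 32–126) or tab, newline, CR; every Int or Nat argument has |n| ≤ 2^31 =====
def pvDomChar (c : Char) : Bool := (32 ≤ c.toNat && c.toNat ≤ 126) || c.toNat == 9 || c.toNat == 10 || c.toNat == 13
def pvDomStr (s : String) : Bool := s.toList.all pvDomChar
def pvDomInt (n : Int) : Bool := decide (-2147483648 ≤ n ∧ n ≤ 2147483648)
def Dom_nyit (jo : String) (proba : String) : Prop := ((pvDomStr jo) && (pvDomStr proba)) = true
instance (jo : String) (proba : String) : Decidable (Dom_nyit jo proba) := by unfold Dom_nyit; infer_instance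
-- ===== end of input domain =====

-- B drops all arithmetic: where A returns, every compared character is a decimal digit,
-- and a per-position difference divisible by 10 is the same as equal digit characters,
-- so B returns the bulk tail equality jo[2:] == proba[2:]; objective: simpler.

-- ===== PORT A =====
def nyit (jo : String) (proba : String) : Option Bool :=
  let egyezik := PySem.Str.len jo == PySem.Str.len proba
  if egyezik then
    some ((PySem.List.pyRange 2 (PySem.Str.len jo) 1).foldl
      (fun eg i =>
        let elteres := (PySem.Int.ofChars? [PySem.List.pyGetD jo.toList i ' ']).getD 0
                     - (PySem.Int.ofChars? [PySem.List.pyGetD proba.toList i ' ']).getD 0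
        if PySem.Int.mod elteres 10 ≠ 0 then false else eg)
      egyezik)
  else none

-- ===== PORT B =====
def nyit_alt (jo : String) (proba : String) : Option Bool :=
  if PySem.Str.len jo == PySem.Str.len proba then
    some (PySem.List.slice jo.toList (some 2) none == PySem.List.slice proba.toList (some 2) none)
  else none

-- ===== PRECONDITION & SPEC =====
-- Pre_ excludes only inputs where Python A raises ValueError: equal-length strings with a
-- non-digit character at an index ≥ 2 (int() on that one-char string fails).
def Pre_nyit (jo : String) (proba : String) : Prop :=
  PySem.Str.len jo = PySem.Str.len proba →
    ((jo.toList.drop 2).all PySem.Chars.isdigit = true ∧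
     (proba.toList.drop 2).all PySem.Chars.isdigit = true)
instance (jo : String) (proba : String) : Decidable (Pre_nyit jo proba) := by
  unfold Pre_nyit; infer_instance

def pvWitness_nyit : String × String := ("123", "456")

def Spec_nyit (jo : String) (proba : String) (out : Option Bool) : Prop := out = nyit_alt jo proba
instance (jo : String) (proba : String) (out : Option Bool) : Decidable (Spec_nyit jo proba out) := by unfold Spec_nyit; infer_instance

-- ===== CLAIM (what is proved, stated in full; the proofs are below) =====
def Claim_equal_nyit : Prop := ∀ (jo : String) (proba : String), Dom_nyit jo proba → Pre_nyit jo proba → Spec_nyit jo proba (nyit jo proba)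

-- ===== LEMMAS AND PROOFS =====

-- A's loop only ever lowers the flag: its result is 'init && every index passed'.
theorem pv_foldl_and {α : Type} (P : α → Bool) (l : List α) (init : Bool) :
    l.foldl (fun eg x => P x && eg) init = (init && l.all P) := by
  induction l generalizing init with
  | nil => simp
  | cons a t ih =>
    simp only [List.foldl_cons, List.all_cons, ih]
    cases init <;> cases P a <;> simp

-- int(c) for a single decimal digit character
theorem pv_ofChars_digit (c : Char) (h : PySem.Chars.isdigit c = true) :
    PySem.Int.ofChars? [c] = some ((c.toNat : Int) - 48) := by
  simp only [PySem.Chars.isdigit, Bool.and_eq_true, decide_eq_true_eq] at h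
  obtain ⟨h0, h9⟩ := h
  have hlo : 48 ≤ c.toNat := h0
  have hhi : c.toNat ≤ 57 := h9
  have hval : c = Char.ofNat c.toNat := (Char.ofNat_toNat c).symm
  interval_cases h : c.toNat <;> rw [hval] <;> decide

-- for digit characters, '10 divides the value difference' is 'the characters are equal'
theorem pv_digit_dvd_iff (c d : Char)
    (hc : PySem.Chars.isdigit c = true) (hd : PySem.Chars.isdigit d = true) :
    ((10:Int) ∣ ((c.toNat : Int) - 48) - ((d.toNat : Int) - 48)) ↔ c = d := by
  simp only [PySem.Chars.isdigit, Bool.and_eq_true, decide_eq_true_eq] at hc hd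
  constructor
  · intro hdvd
    have h1 : (48:Nat) ≤ c.toNat := hc.1
    have h2 : c.toNat ≤ 57 := hc.2
    have h3 : (48:Nat) ≤ d.toNat := hd.1
    have h4 : d.toNat ≤ 57 := hd.2
    have : c.toNat = d.toNat := by omega
    exact Char.ext (UInt32.toNat_inj.mp this)
  · rintro rfl; simp

-- ===== VERDICT (by name: the statement is the Claim_ definition above) =====
theorem nyit_spec : Claim_equal_nyit := by
  intro jo proba _dom pre
  unfold Spec_nyit nyit nyit_alt
  by_cases hb : (PySem.Str.len jo == PySem.Str.len proba) = true
  · rw [if_pos hb, if_pos hb, hb]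
    congr 1
    have hlen : proba.toList.length = jo.toList.length := by
      simp only [PySem.Str.len_eq, beq_iff_eq, Nat.cast_inj] at hb
      omega
    obtain ⟨hdj, hdp⟩ := pre (by simpa [PySem.Str.len_eq] using hb)
    rw [List.all_eq_true] at hdj hdp
    -- each loop step, on an in-range index, tests equality of the two digit characters
    have hstep : ∀ i ∈ PySem.List.pyRange 2 (PySem.Str.len jo) 1, ∀ eg : Bool,
        (if PySem.Int.mod
              ((PySem.Int.ofChars? [PySem.List.pyGetD jo.toList i ' ']).getD 0 -
               (PySem.Int.ofChars? [PySem.List.pyGetD proba.toList i ' ']).getD 0) 10 ≠ 0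
          then false else eg)
        = (decide (jo.toList[i.toNat]? = proba.toList[i.toNat]?) && eg) := by
      intro i hi eg
      rw [PySem.List.mem_pyRange_one] at hi
      have hlenj : (jo.toList.length : Int) = PySem.Str.len jo := by
        simp [PySem.Str.len_eq]
      have hiu : i < (jo.toList.length : Int) := by omega
      have hi0 : (0:Int) ≤ i := by omega
      have hnj : i.toNat < jo.toList.length := by omega
      have hnp : i.toNat < proba.toList.length := by omega
      rw [PySem.List.pyGetD_eq_getElem jo.toList ' ' hi0 hiu,
          PySem.List.pyGetD_eq_getElem proba.toList ' ' hi0 (by omega)]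
      have hcj : PySem.Chars.isdigit jo.toList[i.toNat] = true := by
        apply hdj; rw [List.mem_drop_iff_getElem]
        exact ⟨i.toNat - 2, by omega, by congr 1; omega⟩
      have hcp : PySem.Chars.isdigit proba.toList[i.toNat] = true := by
        apply hdp; rw [List.mem_drop_iff_getElem]
        exact ⟨i.toNat - 2, by omega, by congr 1; omega⟩
      rw [pv_ofChars_digit _ hcj, pv_ofChars_digit _ hcp]
      simp only [Option.getD_some]
      by_cases heq : jo.toList[i.toNat] = proba.toList[i.toNat]
      · have : ((10:Int) ∣ ((jo.toList[i.toNat].toNat : Int) - 48) - ((proba.toList[i.toNat].toNat : Int) - 48)) :=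
          (pv_digit_dvd_iff _ _ hcj hcp).mpr heq
        have hm := (PySem.Int.mod_eq_zero_iff_dvd _ 10).mpr this
        rw [if_neg (by simp; omega), List.getElem?_eq_getElem hnj, List.getElem?_eq_getElem hnp]
        simp [heq]
      · have hnd : ¬ ((10:Int) ∣ ((jo.toList[i.toNat].toNat : Int) - 48) - ((proba.toList[i.toNat].toNat : Int) - 48)) :=
          fun h => heq ((pv_digit_dvd_iff _ _ hcj hcp).mp h)
        have hm : PySem.Int.mod
            (((jo.toList[i.toNat].toNat : Int) - 48) - ((proba.toList[i.toNat].toNat : Int) - 48)) 10 ≠ 0 :=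
          fun hz => hnd ((PySem.Int.mod_eq_zero_iff_dvd _ _).mp hz)
        rw [if_pos hm, List.getElem?_eq_getElem hnj, List.getElem?_eq_getElem hnp]
        simp [heq]
    calc (PySem.List.pyRange 2 (PySem.Str.len jo) 1).foldl
          (fun eg i =>
            if PySem.Int.mod
                ((PySem.Int.ofChars? [PySem.List.pyGetD jo.toList i ' ']).getD 0 -
                 (PySem.Int.ofChars? [PySem.List.pyGetD proba.toList i ' ']).getD 0) 10 ≠ 0
              then false else eg) true
        = (PySem.List.pyRange 2 (PySem.Str.len jo) 1).foldl
            (fun eg i => decide (jo.toList[i.toNat]? = proba.toList[i.toNat]?) && eg) true := by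
          apply PySem.List.foldl_congr_mem
          intro eg i hi
          exact hstep i hi eg
      _ = (PySem.List.pyRange 2 (PySem.Str.len jo) 1).all
            (fun i => decide (jo.toList[i.toNat]? = proba.toList[i.toNat]?)) := by
          rw [pv_foldl_and]; simp
      _ = (PySem.List.slice jo.toList (some 2) none == PySem.List.slice proba.toList (some 2) none) := by
          rw [show ((2:Int)) = ((2:Nat):Int) by norm_num,
              PySem.List.slice_from_natCast, PySem.List.slice_from_natCast]
          rw [Bool.eq_iff_iff, List.all_eq_true, beq_iff_eq]
          constructor
          · intro hall
            apply List.ext_getElem?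
            intro k
            by_cases hk : k < jo.toList.length - 2
            · have := hall ((k:Int) + 2) (by
                rw [PySem.List.mem_pyRange_one]
                constructor
                · omega
                · simp only [PySem.Str.len_eq]; omega)
              simpa [List.getElem?_drop, Int.toNat_add, Nat.add_comm] using this
            · rw [List.getElem?_eq_none (by rw [List.length_drop]; omega),
                  List.getElem?_eq_none (by rw [List.length_drop]; omega)]
          · intro hiff i hi
            rw [PySem.List.mem_pyRange_one] at hi
            have hlenj : (jo.toList.length : Int) = PySem.Str.len jo := by
              simp [PySem.Str.len_eq]
            have h2 : i < (jo.toList.length : Int) := by omega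
            have := congrArg (fun l => l[i.toNat - 2]?) hiff
            simp only [List.getElem?_drop] at this
            simp only [decide_eq_true_eq]
            have harith : 2 + (i.toNat - 2) = i.toNat := by omega
            rwa [harith] at this
  · rw [if_neg hb, if_neg hb]
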